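-- pv_equiv track=rewrite | github.com/kuznetsov-dm/ai_meeting_manager_free | src/aimn/ui/controllers/stage_view_model_composer.py | _warning_marker
-- ===== SOURCE A (Python) =====
-- def _warning_marker(value: object) -> str:
--     text = str(value or "").strip().lower()
--     if not text:
--         return ""
--     for separator in ("(", "=", ":"):
--         if separator in text:
--             text = text.split(separator, 1)[0].strip()
--     return text
-- ===== SOURCE B (Python) =====
-- def _warning_marker(value: object) -> str:
--     text = str(value or "").strip().lower()
--     if not text:
--         return ""
--     kept = []
--     for ch in text:
--         if ch in "(=:":
--             break
--         kept.append(ch)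
--     return "".join(kept).rstrip()
-- ===== Notes on version B (the rewrite author's own statement) =====
-- stated objective: simpler
-- what changed: Instead of three sequential split/strip truncation passes (one per separator), B makes a single left-to-right scan that stops at the first separator character and strips trailing whitespace once.
import Mathlib
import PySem

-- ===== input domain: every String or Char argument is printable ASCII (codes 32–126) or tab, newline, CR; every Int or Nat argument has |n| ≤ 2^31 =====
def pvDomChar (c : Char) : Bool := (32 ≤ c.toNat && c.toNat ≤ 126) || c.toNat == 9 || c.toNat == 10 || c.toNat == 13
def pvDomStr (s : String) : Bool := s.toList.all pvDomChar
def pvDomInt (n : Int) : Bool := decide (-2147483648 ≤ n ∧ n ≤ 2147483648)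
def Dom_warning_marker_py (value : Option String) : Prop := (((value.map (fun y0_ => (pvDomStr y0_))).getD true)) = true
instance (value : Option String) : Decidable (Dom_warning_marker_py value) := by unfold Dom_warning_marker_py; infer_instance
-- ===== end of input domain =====

-- B replaces A's three sequential split/strip truncation passes (one per separator) by a single scan that stops at the first separator character, followed by one rstrip: a simpler decomposition with the same cost.

-- ===== PORT A =====
def warning_marker_py (value : Option String) : String :=
  let text := PySem.Chars.lower (PySem.Chars.strip (value.getD "").toList)
  if text = [] then ""
  else
    String.ofList ([['('], ['='], [':']].foldl
      (fun t sep =>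
        if PySem.Chars.isIn sep t then
          PySem.Chars.strip ((PySem.Chars.splitOnMax t sep 1).headD [])
        else t) text)

-- ===== PORT B =====
def warning_marker_py_alt (value : Option String) : String :=
  let text := PySem.Chars.lower (PySem.Chars.strip (value.getD "").toList)
  if text = [] then ""
  else String.ofList (PySem.Chars.rstrip (text.takeWhile (fun c => !(['(', '=', ':'].contains c))))

-- ===== PRECONDITION & SPEC =====
def Spec_warning_marker_py (value : Option String) (out : String) : Prop := out = warning_marker_py_alt value
instance (value : Option String) (out : String) : Decidable (Spec_warning_marker_py value out) := by unfold Spec_warning_marker_py; infer_instance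

-- ===== CLAIM (what is proved, stated in full; the proofs are below) =====
def Claim_equal_warning_marker_py : Prop := ∀ (value : Option String), Dom_warning_marker_py value → Spec_warning_marker_py value (warning_marker_py value)

-- ===== LEMMAS AND PROOFS =====
lemma goZero (sep : List Char) : ∀ (fuel : Nat) (l cur : List Char) (acc : List (List Char)),
    PySem.Chars.splitOnMax.go sep fuel 0 l cur acc = ((cur.reverse ++ l) :: acc).reverse := by
  intro fuel l cur acc
  cases fuel with
  | zero => rw [PySem.Chars.splitOnMax.go]
  | succ n => cases l with
    | nil => rw [PySem.Chars.splitOnMax.go] <;> simp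
    | cons c rest => rw [PySem.Chars.splitOnMax.go] <;> simp

lemma goOne (a : Char) : ∀ (fuel : Nat) (l cur : List Char) (acc : List (List Char)),
    a ∈ l → l.length < fuel →
    PySem.Chars.splitOnMax.go [a] fuel 1 l cur acc =
      ((l.drop ((l.takeWhile (fun c => c != a)).length + 1)) ::
        (cur.reverse ++ l.takeWhile (fun c => c != a)) :: acc).reverse := by
  intro fuel
  induction fuel with
  | zero => intro l cur acc _ h; omega
  | succ n ih =>
    intro l cur acc hmem hlen
    cases l with
    | nil => exact absurd hmem (by simp)
    | cons c rest =>
      rw [PySem.Chars.splitOnMax.go]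
      by_cases hca : c = a
      · subst hca
        have hp : [c].isPrefixOf (c :: rest) = true := by simp [List.isPrefixOf]
        simp only [hp, if_true, (by omega : ¬ (1 = 0)), if_false]
        rw [goZero]
        simp [List.takeWhile_cons]
      · have hp : [a].isPrefixOf (c :: rest) = false := by
          simp [List.isPrefixOf]; exact fun h => absurd h.symm hca
        simp only [hp, Bool.false_eq_true, if_false, (by omega : ¬ (1 = 0))]
        rw [ih rest (c :: cur) acc (by
            rcases List.mem_cons.mp hmem with h | h
            · exact absurd h.symm hca
            · exact h) (by simpa using Nat.lt_of_succ_lt_succ hlen)]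
        have hne : (c != a) = true := by simpa using hca
        simp [List.takeWhile_cons, hne]

lemma splitHead (a : Char) (t : List Char) (h : a ∈ t) :
    (PySem.Chars.splitOnMax t [a] 1).headD [] = t.takeWhile (fun c => c != a) := by
  unfold PySem.Chars.splitOnMax
  rw [if_neg (by omega)]
  rw [show (1 : Int).toNat = 1 from rfl]
  rw [goOne a (t.length + 1) t [] [] h (by omega)]
  simp

lemma takeWhile_congr_ptwise {p q : Char → Bool} (h : ∀ x, p x = q x) (l : List Char) :
    List.takeWhile p l = List.takeWhile q l := by
  have : p = q := funext h
  rw [this]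

lemma prefix_dropWhile_fix {p : Char → Bool} {l₁ l₂ : List Char} (hpre : l₁ <+: l₂)
    (h : List.dropWhile p l₂ = l₂) : List.dropWhile p l₁ = l₁ := by
  obtain ⟨t, rfl⟩ := hpre
  rw [List.dropWhile_eq_self_iff] at h ⊢
  intro hl
  have h0 := h (by simp; omega)
  rwa [List.getElem_append_left hl] at h0

lemma rstrip_decomp (u : List Char) :
    u = PySem.Chars.rstrip u ++ (u.reverse.takeWhile PySem.Chars.isspace).reverse ∧
    ∀ x ∈ (u.reverse.takeWhile PySem.Chars.isspace).reverse, PySem.Chars.isspace x = true := by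
  constructor
  · conv_lhs => rw [← List.reverse_reverse u, ← List.takeWhile_append_dropWhile
      (p := PySem.Chars.isspace) (l := u.reverse)]
    rw [List.reverse_append]
    rfl
  · intro x hx
    exact List.mem_takeWhile_imp (List.mem_reverse.mp hx)

lemma rstrip_prefix (u : List Char) : PySem.Chars.rstrip u <+: u :=
  ⟨_, ((rstrip_decomp u).1).symm⟩

lemma takeWhile_append_stop {p : Char → Bool} : ∀ {l : List Char} (s : List Char),
    (∃ x ∈ l, p x = false) → List.takeWhile p (l ++ s) = List.takeWhile p l := by
  intro l
  induction l with
  | nil => rintro s ⟨x, hx, _⟩; simp at hx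
  | cons c tl ih =>
    rintro s ⟨x, hx, hpx⟩
    by_cases hpc : p c = true
    · rw [List.cons_append, List.takeWhile_cons, hpc, List.takeWhile_cons, hpc]
      have : ∃ y ∈ tl, p y = false := by
        rcases List.mem_cons.mp hx with h | h
        · exact absurd (h ▸ hpx) (by simp [hpc])
        · exact ⟨x, h, hpx⟩
      rw [ih s this]
    · rw [List.cons_append, List.takeWhile_cons, List.takeWhile_cons]
      simp [Bool.eq_false_iff.mpr hpc]

-- takeWhile (≠ a) sees through rstrip when a survives the rstrip
lemma takeWhile_ne_rstrip (a : Char) (u : List Char) (h : a ∈ PySem.Chars.rstrip u) :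
    List.takeWhile (fun c => c != a) u = List.takeWhile (fun c => c != a) (PySem.Chars.rstrip u) := by
  conv_lhs => rw [(rstrip_decomp u).1]
  exact takeWhile_append_stop _ ⟨a, h, by simp⟩

lemma mem_rstrip_or_space {x : Char} {u : List Char} (h : x ∈ u) :
    x ∈ PySem.Chars.rstrip u ∨ PySem.Chars.isspace x = true := by
  obtain ⟨hdec, hws⟩ := rstrip_decomp u
  rw [hdec] at h
  rcases List.mem_append.mp h with h | h
  · exact Or.inl h
  · exact Or.inr (hws x h)

lemma takeWhile_and_ne_of_not_mem {p : Char → Bool} {a : Char} : ∀ {l : List Char},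
    a ∉ List.takeWhile p l →
    List.takeWhile (fun c => p c && (c != a)) l = List.takeWhile p l := by
  intro l
  induction l with
  | nil => intro _; rfl
  | cons c tl ih =>
    intro h
    by_cases hpc : p c = true
    · rw [List.takeWhile_cons, hpc] at h
      have hca : (c != a) = true := by
        simp only [bne_iff_ne, ne_eq]
        rintro rfl
        exact h (by simp)
      rw [List.takeWhile_cons, List.takeWhile_cons, hpc, hca]
      simp only [Bool.true_and, if_true]
      rw [ih (fun hm => h (by simp [hm]))]
    · rw [List.takeWhile_cons, List.takeWhile_cons, Bool.eq_false_iff.mpr hpc]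
      simp

lemma stepLemma (a : Char) (q l t : List Char) (ha : PySem.Chars.isspace a = false)
    (hl : List.dropWhile PySem.Chars.isspace l = l)
    (ht : t = PySem.Chars.rstrip (List.takeWhile (fun c => !(q.contains c)) l)) :
    (if PySem.Chars.isIn [a] t then
       PySem.Chars.strip ((PySem.Chars.splitOnMax t [a] 1).headD [])
     else t)
    = PySem.Chars.rstrip (List.takeWhile (fun c => !((a :: q).contains c)) l) := by
  by_cases hmem : a ∈ t
  · rw [if_pos (by rw [PySem.Chars.isIn_iff_infix]; exact (List.singleton_infix_iff a t).mpr hmem)]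
    rw [splitHead a t hmem]
    have hXpre : List.takeWhile (fun c => c != a) t <+: l := by
      refine (List.takeWhile_prefix _).trans ?_
      rw [ht]
      exact (rstrip_prefix _).trans (List.takeWhile_prefix _)
    have hlstrip : PySem.Chars.lstrip (List.takeWhile (fun c => c != a) t) =
        List.takeWhile (fun c => c != a) t := prefix_dropWhile_fix hXpre hl
    rw [show PySem.Chars.strip (List.takeWhile (fun c => c != a) t)
        = PySem.Chars.rstrip (List.takeWhile (fun c => c != a) t) from by
      unfold PySem.Chars.strip; rw [hlstrip]]
    rw [ht] at hmem ⊢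
    rw [← takeWhile_ne_rstrip a _ hmem]
    rw [List.takeWhile_takeWhile]
    congr 1
    apply takeWhile_congr_ptwise
    intro x
    simp only [List.contains_cons, Bool.not_or, decide_eq_true_eq]
    by_cases hxa : x = a <;> cases hxq : q.contains x <;> simp [hxa, hxq]
  · rw [if_neg (by
      rw [PySem.Chars.isIn_iff_infix, List.singleton_infix_iff]; exact hmem)]
    rw [ht] at hmem ⊢
    have hnu : a ∉ List.takeWhile (fun c => !(q.contains c)) l := fun h =>
      (mem_rstrip_or_space h).elim hmem (fun hs => by rw [ha] at hs; exact Bool.false_ne_true hs)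
    congr 1
    rw [show (fun c => !((a :: q).contains c)) = (fun c => (!(q.contains c)) && (c != a)) from by
      funext x
      simp only [List.contains_cons, Bool.not_or]
      by_cases hxa : x = a <;> cases hxq : q.contains x <;> simp [hxa, hxq, bne]]
    exact (takeWhile_and_ne_of_not_mem hnu).symm

lemma char_toNat_ofNat {n : Nat} (h : n < 55296) : (Char.ofNat n).toNat = n := by
  unfold Char.ofNat
  rw [dif_pos (by unfold Nat.isValidChar; omega)]
  simp [Char.toNat, Char.ofNatAux]

lemma isspace_lowerChar (c : Char) :
    PySem.Chars.isspace (PySem.Chars.lowerChar c) = PySem.Chars.isspace c := by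
  unfold PySem.Chars.lowerChar
  by_cases hu : PySem.Chars.isupper c = true
  · rw [if_pos hu]
    unfold PySem.Chars.isupper at hu
    have hb : 65 ≤ c.toNat ∧ c.toNat ≤ 90 := by
      simp only [Bool.and_eq_true, decide_eq_true_eq, Char.le_def] at hu
      exact ⟨hu.1, hu.2⟩
    have hval : (Char.ofNat (c.toNat + 32)).toNat = c.toNat + 32 :=
      char_toNat_ofNat (by omega)
    have h2 : PySem.Chars.isspace (Char.ofNat (c.toNat + 32)) = false := by
      simp only [PySem.Chars.isspace, hval]
      simp only [Bool.or_eq_false_iff, Bool.and_eq_false_iff, decide_eq_false_iff_not]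
      omega
    have h1 : PySem.Chars.isspace c = false := by
      simp only [PySem.Chars.isspace]
      simp only [Bool.or_eq_false_iff, Bool.and_eq_false_iff, decide_eq_false_iff_not]
      omega
    rw [h1, h2]
  · rw [if_neg hu]

lemma lstrip_fix_strip (s : List Char) :
    List.dropWhile PySem.Chars.isspace (PySem.Chars.strip s) = PySem.Chars.strip s := by
  unfold PySem.Chars.strip PySem.Chars.rstrip PySem.Chars.lstrip
  exact prefix_dropWhile_fix (rstrip_prefix _) (List.dropWhile_idempotent _ _)

lemma lstrip_fix_t0 (s : List Char) :
    List.dropWhile PySem.Chars.isspace (PySem.Chars.lower (PySem.Chars.strip s)) =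
      PySem.Chars.lower (PySem.Chars.strip s) := by
  unfold PySem.Chars.lower
  rw [List.dropWhile_map, show (PySem.Chars.isspace ∘ PySem.Chars.lowerChar) = PySem.Chars.isspace
      from funext fun x => isspace_lowerChar x, lstrip_fix_strip]

lemma rstrip_fix_t0 (s : List Char) :
    PySem.Chars.rstrip (PySem.Chars.lower (PySem.Chars.strip s)) =
      PySem.Chars.lower (PySem.Chars.strip s) := by
  unfold PySem.Chars.lower PySem.Chars.rstrip
  rw [← List.map_reverse, List.dropWhile_map,
    show (PySem.Chars.isspace ∘ PySem.Chars.lowerChar) = PySem.Chars.isspace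
      from funext fun x => isspace_lowerChar x]
  have : List.dropWhile PySem.Chars.isspace (PySem.Chars.strip s).reverse =
      (PySem.Chars.strip s).reverse := by
    unfold PySem.Chars.strip PySem.Chars.rstrip
    rw [List.reverse_reverse]
    exact List.dropWhile_idempotent _ _
  rw [this, List.map_reverse, List.reverse_reverse]

lemma chain (l : List Char) (hl : List.dropWhile PySem.Chars.isspace l = l)
    (hr : PySem.Chars.rstrip l = l) :
    ([['('], ['='], [':']].foldl (fun t sep =>
        if PySem.Chars.isIn sep t then
          PySem.Chars.strip ((PySem.Chars.splitOnMax t sep 1).headD [])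
        else t) l)
    = PySem.Chars.rstrip (l.takeWhile (fun c => !(['(', '=', ':'].contains c))) := by
  simp only [List.foldl_cons, List.foldl_nil]
  have h0 : l = PySem.Chars.rstrip (List.takeWhile (fun c => !(([] : List Char).contains c)) l) := by
    have htw : List.takeWhile (fun (_ : Char) => true) l = l := by
      induction l with
      | nil => rfl
      | cons c tl ih => rw [List.takeWhile_cons]; simp [ih]
    rw [takeWhile_congr_ptwise (q := fun _ => true) (by simp), htw, hr]
  rw [stepLemma '(' [] l l (by decide) hl h0,
      stepLemma '=' ['('] l _ (by decide) hl rfl,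
      stepLemma ':' ['=', '('] l _ (by decide) hl rfl]
  congr 1
  apply takeWhile_congr_ptwise
  intro x
  simp only [List.contains_cons, List.contains_nil]
  cases x == '(' <;> cases x == '=' <;> cases x == ':' <;> simp

-- ===== VERDICT (by name: the statement is the Claim_ definition above) =====
theorem warning_marker_py_spec : Claim_equal_warning_marker_py := by
  intro value _
  unfold Spec_warning_marker_py warning_marker_py warning_marker_py_alt
  by_cases he : PySem.Chars.lower (PySem.Chars.strip (value.getD "").toList) = []
  · simp [he]
  · simp only [if_neg he]
    exact congrArg String.ofList
      (chain _ (lstrip_fix_t0 (value.getD "").toList) (rstrip_fix_t0 (value.getD "").toList))
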